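-- pv_equiv track=rewrite | github.com/AshtonSinnamon/DIS2022 | Unit 1/Assessment 1/Isomorphic Pairs.py | Isomorphic
-- ===== SOURCE A (Python) =====
-- def Isomorphic(word):
--     pattern = ""
--     for x in range(0, len(word)):
--         count = 1
--         j = x + 1
--         Found = False
--         while not Found and j < len(word):
--             if word[x] == word[j]:
--                 pattern += " +" + str(count)
--                 x += 1
--                 Found = True
--             else:
--                 j += 1
--                 count += 1
--                 Found = False
--             if j + 1 > len(word):
--                 pattern += " 0"
--     return pattern
-- ===== SOURCE B (Python) =====
-- def Isomorphic(word):
--     # single right-to-left pass keeping, per character, its nearest occurrence to the right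
--     n = len(word)
--     nxt = {}
--     parts = []
--     i = n - 1
--     while i >= 0:
--         c = word[i]
--         if i < n - 1:
--             if c in nxt:
--                 parts.append(" +" + str(nxt[c] - i))
--             else:
--                 parts.append(" 0")
--         nxt[c] = i
--         i -= 1
--     return "".join(reversed(parts))
-- ===== Notes on version B (the rewrite author's own statement) =====
-- stated objective: faster
-- what changed: Replaces the per-position forward scan for the next equal character by a single right-to-left pass that keeps a dict of each character's nearest occurrence to the right, collecting the pieces in a list joined at the end.
import Mathlib
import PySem

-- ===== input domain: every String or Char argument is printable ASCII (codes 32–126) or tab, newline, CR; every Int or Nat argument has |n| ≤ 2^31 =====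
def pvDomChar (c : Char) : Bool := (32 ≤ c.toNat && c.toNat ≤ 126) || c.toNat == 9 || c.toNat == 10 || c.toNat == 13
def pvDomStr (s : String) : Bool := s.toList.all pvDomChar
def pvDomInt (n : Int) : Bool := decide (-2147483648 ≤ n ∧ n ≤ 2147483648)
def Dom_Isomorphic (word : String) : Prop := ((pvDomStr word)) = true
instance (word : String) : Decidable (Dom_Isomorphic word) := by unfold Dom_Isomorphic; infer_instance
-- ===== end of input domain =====

-- B replaces A's quadratic per-position forward scan by one right-to-left pass with a
-- dict of nearest next occurrences (objective: faster, asymptotically).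

-- ===== PORT A =====
-- inner 'while not Found and j < len(word)' loop of A; count is a Python int
def pvWhileA (cs : List Char) (cx : Char) (count : Int) (j : Nat) (pattern : String) : String :=
  if _h : j < cs.length then
    if cs[j]? = some cx then
      -- pattern += " +" + str(count); Found = True  (x += 1 has no observable effect: the loop exits)
      if j + 1 > cs.length then pattern ++ " +" ++ PySem.Int.toStr count ++ " 0"
      else pattern ++ " +" ++ PySem.Int.toStr count
    else
      -- j += 1; count += 1; then the 'if j + 1 > len(word)' check, and back to the loop head
      pvWhileA cs cx (count + 1) (j + 1)
        (if (j + 1) + 1 > cs.length then pattern ++ " 0" else pattern)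
  else pattern
termination_by cs.length - j

def Isomorphic (word : String) : String :=
  let cs := word.toList
  (List.range cs.length).foldl
    (fun pattern x =>
      match cs[x]? with
      | some cx => pvWhileA cs cx 1 (x + 1) pattern
      | none => pattern)
    ""

-- ===== PORT B =====
-- B's 'while i >= 0' loop, descending; k = i + 1 (k = 0 means the loop has finished)
def pvLoopB (cs : List Char) (k : Nat) (nxt : PySem.Dict Char Int) (parts : List String) : List String :=
  match k with
  | 0 => parts
  | Nat.succ i =>
    match cs[i]? with
    | none => parts  -- unreachable: i < cs.length at every call
    | some c =>
      pvLoopB cs i (PySem.Dict.insert nxt c (i : Int))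
        (if i < cs.length - 1 then
          parts ++ [match PySem.Dict.get? nxt c with
                    | some v => " +" ++ PySem.Int.toStr (v - (i : Int))
                    | none => " 0"]
        else parts)

def Isomorphic_alt (word : String) : String :=
  let cs := word.toList
  let parts := pvLoopB cs cs.length PySem.Dict.empty []
  String.join parts.reverse

-- ===== PRECONDITION & SPEC =====
def Spec_Isomorphic (word : String) (out : String) : Prop := out = Isomorphic_alt word
instance (word : String) (out : String) : Decidable (Spec_Isomorphic word out) := by unfold Spec_Isomorphic; infer_instance

-- ===== CLAIM (what is proved, stated in full; the proofs are below) =====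
def Claim_equal_Isomorphic : Prop := ∀ (word : String), Dom_Isomorphic word → Spec_Isomorphic word (Isomorphic word)

-- ===== LEMMAS AND PROOFS =====

-- first index k ≥ j with cs[k] = c, if any
def pvFirstIdx (cs : List Char) (c : Char) (j : Nat) : Option Nat :=
  if _h : j < cs.length then
    if cs[j]? = some c then some j else pvFirstIdx cs c (j + 1)
  else none
termination_by cs.length - j

-- the common per-position entry both programs produce for position x (x < cs.length - 1)
def pvEntry (cs : List Char) (x : Nat) : String :=
  match cs[x]? with
  | none => ""
  | some c =>
    match pvFirstIdx cs c (x + 1) with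
    | some k => " +" ++ PySem.Int.toStr ((k : Int) - (x : Int))
    | none => " 0"

theorem pvFirstIdx_ge (cs : List Char) (c : Char) (j k : Nat)
    (h : pvFirstIdx cs c j = some k) : j ≤ k := by
  fun_induction pvFirstIdx cs c j with
  | case1 j h1 h2 => simp at h; omega
  | case2 j h1 h2 ih => have := ih h; omega
  | case3 j h1 => simp at h

theorem join_append (l : List String) (s : String) :
    String.join (l ++ [s]) = String.join l ++ s := by
  simp [String.join]

theorem pvWhileA_stop (cs : List Char) (cx : Char) (count : Int) (j : Nat) (pattern : String)
    (hj : ¬ j < cs.length) : pvWhileA cs cx count j pattern = pattern := by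
  rw [pvWhileA]; simp [hj]

theorem pvWhileA_char (cs : List Char) (cx : Char) (count : Int) (j : Nat) (pattern : String)
    (hj : j < cs.length) :
    pvWhileA cs cx count j pattern =
      pattern ++ (match pvFirstIdx cs cx j with
                  | some k => " +" ++ PySem.Int.toStr (count + ((k : Int) - (j : Int)))
                  | none => " 0") := by
  have H : ∀ m (j : Nat) (count : Int) (pattern : String), cs.length - j ≤ m → j < cs.length →
      pvWhileA cs cx count j pattern =
        pattern ++ (match pvFirstIdx cs cx j with
                    | some k => " +" ++ PySem.Int.toStr (count + ((k : Int) - (j : Int)))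
                    | none => " 0") := by
    intro m
    induction m with
    | zero => intro j count pattern hle hj; omega
    | succ m ih =>
      intro j count pattern hle hj
      rw [pvWhileA, dif_pos hj]
      by_cases hc : cs[j]? = some cx
      · rw [if_pos hc, if_neg (by omega : ¬ (j + 1 > cs.length))]
        rw [pvFirstIdx, dif_pos hj, if_pos hc]
        have h2 : count + ((j : Int) - (j : Int)) = count := by ring
        simp only [h2, String.append_assoc]
      · rw [if_neg hc]
        rw [pvFirstIdx, dif_pos hj, if_neg hc]
        by_cases hlt : j + 1 < cs.length
        · rw [if_neg (by omega : ¬ ((j + 1) + 1 > cs.length))]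
          rw [ih (j + 1) (count + 1) pattern (by omega) hlt]
          cases heq : pvFirstIdx cs cx (j + 1) with
          | some k =>
            have hk := pvFirstIdx_ge cs cx (j + 1) k heq
            have h2 : count + 1 + ((k : Int) - (Nat.cast (j + 1) : Int)) = count + ((k : Int) - (j : Int)) := by
              push_cast; ring
            simp only [h2]
          | none => simp
        · rw [if_pos (by omega : (j + 1) + 1 > cs.length)]
          rw [pvWhileA, dif_neg (by omega : ¬ (j + 1 < cs.length))]
          rw [pvFirstIdx, dif_neg (by omega : ¬ (j + 1 < cs.length))]
  exact H cs.length j count pattern (by omega) hj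

theorem pvFoldA (cs : List Char) (n : Nat) (hn : n ≤ cs.length) (pattern : String) :
    (List.range n).foldl
      (fun pattern x =>
        match cs[x]? with
        | some cx => pvWhileA cs cx 1 (x + 1) pattern
        | none => pattern)
      pattern
    = pattern ++ String.join ((List.range (min n (cs.length - 1))).map (pvEntry cs)) := by
  induction n with
  | zero => simp [String.join]
  | succ n ih =>
    rw [List.range_succ, List.foldl_append, ih (by omega)]
    have hns : cs[n]? = some cs[n] := List.getElem?_eq_getElem (by omega)
    simp only [List.foldl_cons, List.foldl_nil, hns]
    by_cases h : n + 1 < cs.length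
    · rw [pvWhileA_char _ _ _ _ _ h]
      have hm1 : min (n + 1) (cs.length - 1) = n + 1 := by omega
      have hm2 : min n (cs.length - 1) = n := by omega
      rw [hm1, hm2, List.range_succ, List.map_append, List.map_cons, List.map_nil, join_append]
      rw [String.append_assoc]
      congr 1
      simp only [pvEntry, hns]
      cases heq : pvFirstIdx cs cs[n] (n + 1) with
      | some k =>
        have h2 : (1 : Int) + ((k : Int) - (Nat.cast (n + 1) : Int)) = (k : Int) - (n : Int) := by
          push_cast; ring
        simp only [h2]
      | none => rfl
    · have hEnd : n + 1 = cs.length := by omega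
      rw [pvWhileA_stop _ _ _ _ _ (by omega : ¬ n + 1 < cs.length)]
      have hm : min (n + 1) (cs.length - 1) = min n (cs.length - 1) := by omega
      rw [hm]

theorem pvLoopB_char (cs : List Char) (k : Nat) (hk : k ≤ cs.length)
    (nxt : PySem.Dict Char Int) (parts : List String)
    (hinv : ∀ c, PySem.Dict.get? nxt c = (pvFirstIdx cs c k).map (fun m => Int.ofNat m)) :
    pvLoopB cs k nxt parts =
      parts ++ ((List.range (min k (cs.length - 1))).map (pvEntry cs)).reverse := by
  induction k generalizing nxt parts with
  | zero => simp [pvLoopB]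
  | succ i ih =>
    have hi : i < cs.length := by omega
    have hcs : cs[i]? = some cs[i] := List.getElem?_eq_getElem hi
    simp only [pvLoopB, hcs]
    have hinv' : ∀ c', PySem.Dict.get? (PySem.Dict.insert nxt cs[i] (i : Int)) c'
        = (pvFirstIdx cs c' i).map (fun m => Int.ofNat m) := by
      intro c'
      rw [PySem.Dict.get?_insert]
      rw [pvFirstIdx, dif_pos hi]
      by_cases hc : c' = cs[i]
      · rw [if_pos hc, if_pos (by rw [hcs, hc])]
        rfl
      · rw [if_neg hc, if_neg (by simp [hcs]; exact fun h => hc h.symm), hinv c']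
    rw [ih (by omega) _ _ hinv']
    by_cases h : i < cs.length - 1
    · rw [if_pos h]
      have hm1 : min (i + 1) (cs.length - 1) = i + 1 := by omega
      have hm2 : min i (cs.length - 1) = i := by omega
      rw [hm1, hm2, List.range_succ, List.map_append, List.map_cons, List.map_nil,
        List.reverse_append, List.append_assoc]
      congr 2
      simp only [pvEntry, hcs, hinv cs[i], List.reverse_cons, List.reverse_nil,
        List.nil_append]
      cases heq : pvFirstIdx cs cs[i] (i + 1) with
      | some m => simp
      | none => simp
    · rw [if_neg h]
      have hm : min (i + 1) (cs.length - 1) = min i (cs.length - 1) := by omega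
      rw [hm]

-- ===== VERDICT (by name: the statement is the Claim_ definition above) =====
theorem Isomorphic_spec : Claim_equal_Isomorphic := by
  intro word _
  unfold Spec_Isomorphic Isomorphic Isomorphic_alt
  show _ = String.join (pvLoopB word.toList word.toList.length PySem.Dict.empty []).reverse
  rw [pvFoldA word.toList word.toList.length le_rfl ""]
  rw [pvLoopB_char word.toList word.toList.length le_rfl PySem.Dict.empty []
      (by intro c; rw [pvFirstIdx]; simp [PySem.Dict.get?_empty])]
  simp
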